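-- pv_equiv track=rewrite | github.com/ayoubc/competitive-programming | online_judges/codejam/2021/round1_c/b.py | isroaring
-- ===== SOURCE A (Python) =====
-- def isroaring(y):
--     n = len(y)
--     for p in range(1, n//2 + 1):
--         cur = y[:p]
--         index = p
--         ok = True
--         while index < n:
--             s = str(int(cur)+1)
--             new_index = y.find(s, index)
--             if new_index != index:
--                 ok = False
--                 break
--
--             cur = s
--             index = index + len(s)
--
--         if ok:
--             return True
--     return False
-- ===== SOURCE B (Python) =====
-- def isroaring(y):
--     n = len(y)
--     for p in range(1, n // 2 + 1):
--         num = int(y[:p])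
--         result = y[:p]
--         while len(result) < n:
--             num += 1
--             result += str(num)
--         if result == y:
--             return True
--     return False
-- ===== Notes on version B (the rewrite author's own statement) =====
-- stated objective: simpler
-- what changed: For each candidate first-chunk length p, B builds the whole consecutive-integer concatenation starting from y[:p] and compares it to y once, instead of A's cursor walk that re-parses the matched chunk, searches with str.find and breaks early on mismatch.
-- outside the precondition, e.g. on isroaring('9 1011'): A returns True, B returns True
import Mathlib
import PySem

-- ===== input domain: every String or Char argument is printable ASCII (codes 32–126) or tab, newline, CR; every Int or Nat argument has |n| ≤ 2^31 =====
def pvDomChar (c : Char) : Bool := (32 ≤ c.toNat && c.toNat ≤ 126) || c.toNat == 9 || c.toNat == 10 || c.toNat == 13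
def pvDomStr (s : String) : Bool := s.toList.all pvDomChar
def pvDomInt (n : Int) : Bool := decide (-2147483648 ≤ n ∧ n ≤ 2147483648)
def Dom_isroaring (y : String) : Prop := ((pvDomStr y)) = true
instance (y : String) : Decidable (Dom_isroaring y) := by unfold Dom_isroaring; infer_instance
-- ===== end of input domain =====

-- B re-implements the per-start check by building the whole candidate concatenation and comparing
-- it to the input once, instead of A's find-and-cursor walk with an early break (objective: simpler).

-- Python's int(s), ported by hand: an exact step-for-step copy of PySem.Int.ofChars?'s algorithm
-- (whitespace strip, optional sign, digits with single '_' separators; none = ValueError).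
-- The copy is kept because every definition here must stay transparent to the str/int round-trip
-- proof below; it is used as the port of int() by BOTH ports.
def pvIntGo : List Char → Bool → Nat → Option Nat
  | [], afterDigit, acc => if afterDigit = true then some acc else none
  | c :: rest, afterDigit, acc =>
      if c.isDigit = true then pvIntGo rest true (acc * 10 + (c.toNat - '0'.toNat))
      else
        if c = '_' ∧ afterDigit = true then
          match rest with
          | d :: _tail => if d.isDigit = true then pvIntGo rest false acc else none
          | [] => none
        else none

def pvIntDigitsVal? : List Char → Option Nat
  | [] => none
  | cs => pvIntGo cs false 0

def pvIntParse? (s : List Char) : Option Int :=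
  match (List.dropWhile PySem.Int.isIntSpace (List.dropWhile PySem.Int.isIntSpace s).reverse).reverse with
  | '-' :: ds => Option.map (fun n => -n) (do let a ← pvIntDigitsVal? ds; pure ((a : Nat) : Int))
  | '+' :: ds => Option.map (fun n => n) (do let a ← pvIntDigitsVal? ds; pure ((a : Nat) : Int))
  | ds => Option.map (fun n => n) (do let a ← pvIntDigitsVal? ds; pure ((a : Nat) : Int))

-- str(n) is never empty: cited by the termination proofs of both ports' loops.
theorem pvToDigitsCore_len (b fuel n : Nat) (ds : List Char) :
    ds.length ≤ (Nat.toDigitsCore b fuel n ds).length := by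
  induction fuel generalizing n ds with
  | zero => simp [Nat.toDigitsCore]
  | succ fuel ih =>
    simp only [Nat.toDigitsCore]
    split
    · simp
    · exact le_trans (by simp) (ih _ _)

theorem pvToCharsLen (v : Int) : 1 ≤ (PySem.Int.toChars v).length := by
  unfold PySem.Int.toChars
  split
  · simp
  · unfold Nat.toDigits
    unfold Nat.toDigitsCore
    dsimp only
    split
    · simp
    · exact le_trans (by simp) (pvToDigitsCore_len _ _ _ _)

-- ===== PORT A =====
-- while index < n: s = str(int(cur)+1); new_index = y.find(s, index); break on mismatch.
-- (index is carried as a Nat: in Python it starts at p ≥ 1 and only grows.)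
def isrLoop (ys : List Char) (n : Nat) (cur : List Char) (index : Nat) : Bool :=
  if _h : index < n then
    match pvIntParse? cur with
    | none => false          -- Python raises ValueError here (excluded by Pre_)
    | some v =>
      let s := PySem.Int.toChars (v + 1)
      if PySem.Chars.findFrom ys s (index : Int) ≠ (index : Int) then false
      else isrLoop ys n s (index + s.length)
  else true
  termination_by n - index
  decreasing_by
    have h1 := pvToCharsLen (v + 1)
    omega

-- for p in range(1, n//2 + 1): cur = y[:p]; index = p; … ; if ok: return True / return False
def isrOuter (ys : List Char) (n : Nat) : List Int → Bool
  | [] => false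
  | p :: ps =>
    if isrLoop ys n (PySem.List.slice ys none (some p)) p.toNat then true
    else isrOuter ys n ps

def isroaring (y : String) : Bool :=
  isrOuter y.toList y.toList.length
    (PySem.List.pyRange 1 (PySem.Int.floordiv (y.toList.length : Int) 2 + 1) 1)

-- ===== PORT B =====
-- result = y[:p]; while len(result) < n: num += 1; result += str(num)
def isrBuild (n : Nat) (result : List Char) (num : Int) : List Char :=
  if _h : result.length < n then
    isrBuild n (result ++ PySem.Int.toChars (num + 1)) (num + 1)
  else result
  termination_by n - result.length
  decreasing_by
    have h1 := pvToCharsLen (num + 1)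
    simp only [List.length_append]
    omega

-- for p in range(1, n//2 + 1): num = int(y[:p]); build; if result == y: return True / return False
def isrAltOuter (ys : List Char) (n : Nat) : List Int → Bool
  | [] => false
  | p :: ps =>
    match pvIntParse? (PySem.List.slice ys none (some p)) with
    | none => false          -- int() raises here (excluded by Pre_)
    | some num =>
      if isrBuild n (PySem.List.slice ys none (some p)) num == ys then true
      else isrAltOuter ys n ps

def isroaring_alt (y : String) : Bool :=
  isrAltOuter y.toList y.toList.length
    (PySem.List.pyRange 1 (PySem.Int.floordiv (y.toList.length : Int) 2 + 1) 1)

-- ===== PRECONDITION & SPEC =====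
-- The shape of a Python int literal, stated as closed-form conditions on the characters:
-- after stripping surrounding whitespace and one optional sign, a nonempty run of digits and
-- single '_' separators ('_' never first, last, or doubled).
def pvDigitBody (b : List Char) : Bool :=
  !b.isEmpty && b.head? != some '_' && b.getLast? != some '_' &&
  b.all (fun c => c.isDigit || c == '_') &&
  (b.zip b.tail).all (fun q => !(q.1 == '_' && q.2 == '_'))

def pvIntShape (l : List Char) : Bool :=
  pvDigitBody
    (match (List.dropWhile PySem.Int.isIntSpace
        (List.dropWhile PySem.Int.isIntSpace l).reverse).reverse with
     | '-' :: ds => ds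
     | '+' :: ds => ds
     | ds => ds)
-- A evaluates int(y[:p]) for p = 1 … n//2 and raises ValueError on the first prefix that is
-- not an int literal; Pre_ excludes exactly the strings with such a prefix.  (A can return —
-- True — on a few such strings by succeeding at a smaller p before the bad prefix is reached,
-- e.g. "9 1011"; B returns the same value there, see the claim cites.)
def Pre_isroaring (y : String) : Prop :=
  ∀ p : Nat, p < y.toList.length / 2 + 1 → 1 ≤ p → pvIntShape (y.toList.take p) = true
instance (y : String) : Decidable (Pre_isroaring y) := by unfold Pre_isroaring; infer_instance

def pvWitness_isroaring : String := "12"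

def Spec_isroaring (y : String) (out : Bool) : Prop := out = isroaring_alt y
instance (y : String) (out : Bool) : Decidable (Spec_isroaring y out) := by
  unfold Spec_isroaring; infer_instance

-- ===== CLAIM (what is proved, stated in full; the proofs are below) =====
def Claim_equal_isroaring : Prop :=
  ∀ (y : String), Dom_isroaring y → Pre_isroaring y → Spec_isroaring y (isroaring y)

-- ===== LEMMAS AND PROOFS =====

-- ---- digits of a Nat, little proof-side mirror of Nat.toDigits ----
def pvDigitsOf (n : Nat) : List Char :=
  if _h : n < 10 then [Nat.digitChar n]
  else pvDigitsOf (n / 10) ++ [Nat.digitChar (n % 10)]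
  termination_by n
  decreasing_by omega

theorem pvToDigitsCore_eq (fuel n : Nat) (ds : List Char) (h : n < fuel) :
    Nat.toDigitsCore 10 fuel n ds = pvDigitsOf n ++ ds := by
  induction fuel generalizing n ds with
  | zero => omega
  | succ fuel ih =>
    simp only [Nat.toDigitsCore]
    by_cases h10 : n < 10
    · rw [if_pos (by omega)]
      rw [pvDigitsOf, dif_pos h10]
      simp [Nat.mod_eq_of_lt h10]
    · rw [if_neg (by omega)]
      rw [ih (n / 10) _ (by omega)]
      conv_rhs => rw [pvDigitsOf]
      rw [dif_neg h10]
      simp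

theorem pvToDigits_eq (n : Nat) : Nat.toDigits 10 n = pvDigitsOf n := by
  have := pvToDigitsCore_eq (n + 1) n [] (by omega)
  simpa [Nat.toDigits] using this

theorem pvDigitChar_isDigit (k : Nat) (h : k < 10) : (Nat.digitChar k).isDigit = true := by
  interval_cases k <;> decide

theorem pvDigitChar_val (k : Nat) (h : k < 10) : (Nat.digitChar k).toNat - '0'.toNat = k := by
  interval_cases k <;> decide

theorem pvDigitsOf_digits (n : Nat) : ∀ c ∈ pvDigitsOf n, c.isDigit = true := by
  induction n using Nat.strong_induction_on with
  | _ n ih =>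
    by_cases h10 : n < 10
    · rw [pvDigitsOf, dif_pos h10]
      intro c hc
      simp at hc
      subst hc
      exact pvDigitChar_isDigit n h10
    · rw [pvDigitsOf, dif_neg h10]
      intro c hc
      rcases List.mem_append.mp hc with h1 | h1
      · exact ih (n / 10) (by omega) c h1
      · simp at h1; subst h1; exact pvDigitChar_isDigit _ (by omega)

theorem pvDigitsOf_ne_nil (n : Nat) : pvDigitsOf n ≠ [] := by
  by_cases h10 : n < 10
  · rw [pvDigitsOf, dif_pos h10]; simp
  · rw [pvDigitsOf, dif_neg h10]; simp

theorem pvGo_digitsOf (n : Nat) (l : List Char) (b : Bool) (acc : Nat) :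
    pvIntGo (pvDigitsOf n ++ l) b acc
      = pvIntGo l true (acc * 10 ^ (pvDigitsOf n).length + n) := by
  induction n using Nat.strong_induction_on generalizing l b acc with
  | _ n ih =>
    by_cases h10 : n < 10
    · rw [pvDigitsOf, dif_pos h10]
      simp only [List.cons_append, List.nil_append, pvIntGo,
        pvDigitChar_isDigit n h10, if_true]
      rw [pvDigitChar_val n h10]
      norm_num
    · conv_lhs => rw [pvDigitsOf, dif_neg h10]
      rw [List.append_assoc, List.singleton_append]
      rw [ih (n / 10) (by omega)]
      simp only [pvIntGo, pvDigitChar_isDigit (n % 10) (by omega), if_true]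
      rw [pvDigitChar_val (n % 10) (by omega)]
      conv_rhs => rw [pvDigitsOf, dif_neg h10]
      congr 1
      simp [List.length_append, pow_succ]
      ring_nf
      omega

theorem pvNotSpace_digit (c : Char) (h : c.isDigit = true) : PySem.Int.isIntSpace c = false := by
  unfold PySem.Int.isIntSpace
  simp only [Bool.or_eq_false_iff, decide_eq_false_iff_not]
  and_intros <;> rintro rfl <;> exact absurd h (by decide)

theorem pvDropWhile_eq_self (p : Char → Bool) (l : List Char) (h : ∀ c ∈ l, p c = false) :
    List.dropWhile p l = l := by
  cases l with
  | nil => rfl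
  | cons c t => simp [h c (by simp)]

theorem pvStrip_eq_self (l : List Char) (h : ∀ c ∈ l, PySem.Int.isIntSpace c = false) :
    (List.dropWhile PySem.Int.isIntSpace
      (List.dropWhile PySem.Int.isIntSpace l).reverse).reverse = l := by
  rw [pvDropWhile_eq_self _ _ h]
  rw [pvDropWhile_eq_self _ _ (by intro c hc; exact h c (List.mem_reverse.mp hc))]
  exact List.reverse_reverse l

theorem pvDV_ne_nil (l : List Char) (h : l ≠ []) : pvIntDigitsVal? l = pvIntGo l false 0 := by
  cases l with
  | nil => exact absurd rfl h
  | cons c t => rfl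

theorem pvDV_digitsOf (m : Nat) : pvIntDigitsVal? (pvDigitsOf m) = some m := by
  rw [pvDV_ne_nil _ (pvDigitsOf_ne_nil m)]
  have := pvGo_digitsOf m [] false 0
  rw [List.append_nil] at this
  rw [this]
  simp [pvIntGo]

theorem pvParse_digitsOf (m : Nat) : pvIntParse? (pvDigitsOf m) = some (m : Int) := by
  unfold pvIntParse?
  rw [pvStrip_eq_self _ (fun c hc => pvNotSpace_digit c (pvDigitsOf_digits m c hc))]
  split
  · rename_i ds heq
    have h1 : ('-' : Char) ∈ pvDigitsOf m := by rw [heq]; simp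
    exact absurd (pvDigitsOf_digits m '-' h1) (by decide)
  · rename_i ds heq
    have h1 : ('+' : Char) ∈ pvDigitsOf m := by rw [heq]; simp
    exact absurd (pvDigitsOf_digits m '+' h1) (by decide)
  · simp [pvDV_digitsOf m]

theorem pvParse_toChars (v : Int) : pvIntParse? (PySem.Int.toChars v) = some v := by
  unfold PySem.Int.toChars
  split
  · rename_i hneg
    rw [pvToDigits_eq]
    unfold pvIntParse?
    rw [pvStrip_eq_self]
    · show Option.map (fun n => -n) (do let a ← pvIntDigitsVal? (pvDigitsOf v.natAbs); pure ((a : Nat) : Int)) = some v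
      rw [pvDV_digitsOf]
      have h2 : ((v.natAbs : Nat) : Int) = -v := by omega
      simp [h2]
    · intro c hc
      rcases List.mem_cons.mp hc with rfl | hc
      · decide
      · exact pvNotSpace_digit c (pvDigitsOf_digits _ c hc)
  · rename_i hpos
    rw [pvToDigits_eq, pvParse_digitsOf]
    congr 1
    omega

theorem pvFindAt (ys s : List Char) (k : Nat) (hk : k ≤ ys.length) :
    PySem.Chars.findFrom ys s (k : Int) = (k : Int) ↔ s <+: ys.drop k := by
  constructor
  · intro h
    have hne : PySem.Chars.findFrom ys s (k : Int) ≠ -1 := by omega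
    have hs := PySem.Chars.findFrom_natCast_spec ys s k hk hne
    have : (PySem.Chars.findFrom ys s (k : Int)).toNat = k := by omega
    rw [this] at hs
    exact hs.2.1
  · intro h
    have hne : PySem.Chars.findFrom ys s (k : Int) ≠ -1 := by
      rw [ne_eq, PySem.Chars.findFrom_natCast_eq_neg_one_iff ys s k hk]
      simp only [not_not]
      exact h.isInfix
    have hs := PySem.Chars.findFrom_natCast_spec ys s k hk hne
    by_contra hne2
    have hlt : k < (PySem.Chars.findFrom ys s (k : Int)).toNat := by omega
    exact hs.2.2 k le_rfl hlt h

theorem pvPrefixSplit (ys s : List Char) (i : Nat) :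
    ys.take i ++ s <+: ys ↔ s <+: ys.drop i := by
  constructor
  · rintro ⟨t, ht⟩
    refine ⟨t, ?_⟩
    have h2 : ys.take i ++ (s ++ t) = ys.take i ++ ys.drop i := by
      rw [← List.append_assoc, ht, List.take_append_drop]
    exact List.append_cancel_left h2
  · rintro ⟨t, ht⟩
    refine ⟨t, ?_⟩
    rw [List.append_assoc, ht, List.take_append_drop]

theorem pvTakeAdd (ys s : List Char) (i : Nat) (h : s <+: ys.drop i) :
    ys.take (i + s.length) = ys.take i ++ s := by
  obtain ⟨t, ht⟩ := h
  rw [List.take_add]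
  congr 1
  rw [← ht]
  exact List.take_left

theorem pvPrefLen (ys s : List Char) (i : Nat) (hi : i ≤ ys.length)
    (h : s <+: ys.drop i) : i + s.length ≤ ys.length := by
  have := h.length_le
  simp [List.length_drop] at this
  omega

-- ---- B's builder can never equal ys once the prefix is broken ----
theorem pvBuild_ne (n : Nat) (ys result : List Char) (num : Int)
    (h : ¬ result <+: ys) : (isrBuild n result num == ys) = false := by
  rw [isrBuild]
  split
  · refine pvBuild_ne n ys _ (num + 1) ?_
    intro hpre
    exact h (List.prefix_append _ _ |>.trans hpre)
  · simp only [beq_eq_false_iff_ne, ne_eq]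
    intro hq
    exact h (hq ▸ List.prefix_refl _)
  termination_by n - result.length
  decreasing_by
    have h1 := pvToCharsLen (num + 1)
    rename_i hlt
    simp only [List.length_append]
    omega

-- ---- the inner loops agree ----
theorem pvLoop_eq (ys : List Char) (index : Nat) (hle : index ≤ ys.length)
    (cur : List Char) (v : Int) (hp : pvIntParse? cur = some v) :
    isrLoop ys ys.length cur index = (isrBuild ys.length (ys.take index) v == ys) := by
  rw [isrLoop]
  by_cases h : index < ys.length
  · rw [dif_pos h, hp]
    simp only
    by_cases hf : PySem.Chars.findFrom ys (PySem.Int.toChars (v + 1)) (index : Int) = (index : Int)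
    · rw [if_neg (by simp [hf])]
      have hpre : PySem.Int.toChars (v + 1) <+: ys.drop index :=
        (pvFindAt ys _ index (le_of_lt h)).mp hf
      have hlen : index + (PySem.Int.toChars (v + 1)).length ≤ ys.length :=
        pvPrefLen ys _ index (le_of_lt h) hpre
      rw [pvLoop_eq ys (index + (PySem.Int.toChars (v + 1)).length) hlen _ (v + 1)
        (pvParse_toChars (v + 1))]
      rw [pvTakeAdd ys _ index hpre]
      conv_rhs => rw [isrBuild]
      rw [dif_pos (by simp; omega)]
    · rw [if_pos (by simp [hf])]
      have hnp : ¬ ys.take index ++ PySem.Int.toChars (v + 1) <+: ys := by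
        intro hpp
        exact hf ((pvFindAt ys _ index (le_of_lt h)).mpr ((pvPrefixSplit ys _ index).mp hpp))
      conv_rhs => rw [isrBuild]
      rw [dif_pos (by simp; omega)]
      exact (pvBuild_ne _ _ _ _ hnp).symm
  · rw [dif_neg h]
    have hix : index = ys.length := by omega
    subst hix
    conv_rhs => rw [isrBuild]
    rw [dif_neg (by simp)]
    simp [List.take_length]
  termination_by ys.length - index
  decreasing_by
    have h1 := pvToCharsLen (v + 1)
    omega

-- ---- an int-literal shape really parses ----
theorem pvDigit_ne_underscore (c : Char) (h : c.isDigit = true) : c ≠ '_' := by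
  rintro rfl; exact absurd h (by decide)

theorem pvGo_some (l : List Char) (ad : Bool) (acc : Nat)
    (hne : ad = true ∨ l ≠ [])
    (hall : ∀ c ∈ l, c.isDigit = true ∨ c = '_')
    (hhead : ad = true ∨ l.head? ≠ some '_')
    (hlast : l.getLast? ≠ some '_')
    (hchain : ((l.zip l.tail).all (fun q => !(q.1 == '_' && q.2 == '_'))) = true) :
    (pvIntGo l ad acc).isSome = true := by
  induction l generalizing ad acc with
  | nil =>
    rcases hne with h | h
    · simp [pvIntGo, h]
    · exact absurd rfl h
  | cons c t ih =>
    rcases hall c (by simp) with hd | hu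
    · simp only [pvIntGo, hd, if_true]
      refine ih true _ (Or.inl rfl) (fun x hx => hall x (by simp [hx])) (Or.inl rfl) ?_ ?_
      · cases t with
        | nil => simp
        | cons d t2 => simpa [List.getLast?_cons_cons] using hlast
      · cases t with
        | nil => simp
        | cons d t2 =>
          have := hchain
          simp only [List.tail_cons, List.zip_cons_cons, List.all_cons,
            Bool.and_eq_true] at this
          simpa only [List.tail_cons] using this.2
    · subst hu
      have had : ad = true := by
        rcases hhead with h | h
        · exact h
        · exact (h rfl).elim
      cases t with
      | nil => exact absurd (by simp) hlast
      | cons d t2 =>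
        have hch := hchain
        simp only [List.tail_cons, List.zip_cons_cons, List.all_cons, Bool.and_eq_true] at hch
        have hdne : d ≠ '_' := by
          intro hdeq
          subst hdeq
          simpa using hch.1
        have hdd : d.isDigit = true := by
          rcases hall d (by simp) with h | h
          · exact h
          · exact absurd h hdne
        subst had
        have h9 := ih false acc (Or.inr (by simp)) (fun x hx => hall x (by simp [hx]))
          (Or.inr (by
            simp only [List.head?_cons, ne_eq, Option.some.injEq]
            exact pvDigit_ne_underscore d hdd))
          (by simpa using hlast)
          (by simpa only [List.tail_cons] using hch.2)
        simp only [pvIntGo, show ('_' : Char).isDigit = false from rfl, Bool.false_eq_true,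
          if_false, and_self, if_pos, hdd] at h9 ⊢
        exact h9

theorem pvBody_some (ds : List Char) (h : pvDigitBody ds = true) :
    (pvIntDigitsVal? ds).isSome = true := by
  simp only [pvDigitBody, Bool.and_eq_true, Bool.not_eq_eq_eq_not, Bool.not_true,
    List.isEmpty_eq_false_iff, bne_iff_ne, ne_eq] at h
  obtain ⟨⟨⟨⟨h1, h2⟩, h3⟩, h4⟩, h5⟩ := h
  rw [pvDV_ne_nil ds h1]
  refine pvGo_some ds false 0 (Or.inr h1) ?_ (Or.inr h2) h3 h5
  intro c hc
  have := List.all_eq_true.mp h4 c hc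
  simp only [Bool.or_eq_true, beq_iff_eq] at this
  exact this

theorem pvShape_some (l : List Char) (h : pvIntShape l = true) :
    (pvIntParse? l).isSome = true := by
  unfold pvIntShape at h
  unfold pvIntParse?
  split
  · rename_i ds heq
    rw [heq] at h
    obtain ⟨a, ha⟩ := Option.isSome_iff_exists.mp (pvBody_some ds h)
    simp [ha]
  · rename_i ds heq
    rw [heq] at h
    obtain ⟨a, ha⟩ := Option.isSome_iff_exists.mp (pvBody_some ds h)
    simp [ha]
  · rename_i hne1 hne2
    rw [show (match (List.dropWhile PySem.Int.isIntSpace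
        (List.dropWhile PySem.Int.isIntSpace l).reverse).reverse with
     | '-' :: ds => ds
     | '+' :: ds => ds
     | ds => ds) = (List.dropWhile PySem.Int.isIntSpace
        (List.dropWhile PySem.Int.isIntSpace l).reverse).reverse from by
      split
      · rename_i heq; exact absurd heq (hne1 _)
      · rename_i heq; exact absurd heq (hne2 _)
      · rfl] at h
    obtain ⟨a, ha⟩ := Option.isSome_iff_exists.mp (pvBody_some _ h)
    simp [ha]

-- ---- the outer loops agree ----
theorem pvOuter_eq (ys : List Char) (ps : List Int)
    (hps : ∀ p ∈ ps, 1 ≤ p ∧ p.toNat ≤ ys.length ∧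
      (pvIntParse? (ys.take p.toNat)).isSome = true) :
    isrOuter ys ys.length ps = isrAltOuter ys ys.length ps := by
  induction ps with
  | nil => rfl
  | cons p ps ih =>
    obtain ⟨hp1, hpn, hpsome⟩ := hps p (List.mem_cons_self ..)
    obtain ⟨num, hnum⟩ := Option.isSome_iff_exists.mp hpsome
    have hslice : PySem.List.slice ys none (some p) = ys.take p.toNat :=
      PySem.List.slice_to ys (by omega)
    simp only [isrOuter, isrAltOuter, hslice, hnum]
    rw [pvLoop_eq ys p.toNat hpn _ num hnum]
    rw [ih (fun q hq => hps q (List.mem_cons_of_mem _ hq))]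

-- ===== VERDICT (by name: the statement is the Claim_ definition above) =====
theorem isroaring_spec : Claim_equal_isroaring := by
  intro y _hdom hpre
  unfold Spec_isroaring isroaring isroaring_alt
  apply pvOuter_eq
  intro p hpmem
  rw [PySem.List.mem_pyRange_one] at hpmem
  rw [PySem.Int.floordiv_eq_ediv_of_pos (by omega)] at hpmem
  obtain ⟨h1, h2⟩ := hpmem
  exact ⟨h1, by omega, pvShape_some _ (hpre p.toNat (by omega) (by omega))⟩
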